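-- pv_equiv track=rewrite | github.com/Abhi-mishra998/ACP_Agent | services/gateway/inference_proxy.py | _build_flags
-- ===== SOURCE A (Python) =====
-- def _build_flags(triggers: list[str]) -> list[str]:
--     flags: list[str] = []
--     if any(
--         kw in ["password", "secret", "token", "credential", "private_key"]
--         for kw in triggers
--     ):
--         flags.append("data_exfiltration_risk")
--     if any(
--         kw in ["drop", "truncate", "delete", "format", "remove"] for kw in triggers
--     ):
--         flags.append("destructive_action")
--     if any(kw in ["bypass", "override", "inject"] for kw in triggers):
--         flags.append("security_bypass")
--     return flags
-- ===== SOURCE B (Python) =====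
-- _EXFIL = {"password", "secret", "token", "credential", "private_key"}
-- _DESTRUCTIVE = {"drop", "truncate", "delete", "format", "remove"}
-- _BYPASS = {"bypass", "override", "inject"}
--
--
-- def _build_flags(triggers: list[str]) -> list[str]:
--     exfil = destructive = bypass = False
--     for kw in triggers:
--         exfil = exfil or kw in _EXFIL
--         destructive = destructive or kw in _DESTRUCTIVE
--         bypass = bypass or kw in _BYPASS
--     flags: list[str] = []
--     if exfil:
--         flags.append("data_exfiltration_risk")
--     if destructive:
--         flags.append("destructive_action")
--     if bypass:
--         flags.append("security_bypass")
--     return flags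
-- ===== Notes on version B (the rewrite author's own statement) =====
-- stated objective: faster
-- what changed: Replaces A's three separate any()-scans over triggers (each with per-element list membership) with a single pass that OR-s set membership into three boolean accumulators and builds the flag list afterwards.
import Mathlib
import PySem

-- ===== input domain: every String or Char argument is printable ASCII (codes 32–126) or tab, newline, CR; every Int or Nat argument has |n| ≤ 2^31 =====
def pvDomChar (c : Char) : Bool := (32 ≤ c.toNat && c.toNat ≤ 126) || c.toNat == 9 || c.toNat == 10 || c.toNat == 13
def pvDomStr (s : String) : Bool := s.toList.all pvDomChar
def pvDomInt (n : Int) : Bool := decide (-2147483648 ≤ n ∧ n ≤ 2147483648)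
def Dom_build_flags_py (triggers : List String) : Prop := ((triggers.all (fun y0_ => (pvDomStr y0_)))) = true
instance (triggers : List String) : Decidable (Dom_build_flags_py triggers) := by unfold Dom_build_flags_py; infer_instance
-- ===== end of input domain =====

-- B replaces A's three separate any()-scans of triggers with one pass keeping three boolean accumulators (alternative decomposition).


-- ===== PORT A =====
-- A: build flags, appending each flag if any trigger is in the corresponding literal list.
def build_flags_py (triggers : List String) : List String :=
  let flags : List String := []
  let flags :=
    if triggers.any (fun kw => kw ∈ ["password", "secret", "token", "credential", "private_key"]) then
      flags ++ ["data_exfiltration_risk"] else flags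
  let flags :=
    if triggers.any (fun kw => kw ∈ ["drop", "truncate", "delete", "format", "remove"]) then
      flags ++ ["destructive_action"] else flags
  let flags :=
    if triggers.any (fun kw => kw ∈ ["bypass", "override", "inject"]) then
      flags ++ ["security_bypass"] else flags
  flags

-- ===== PORT B =====
def pvExfil : PySem.Set String := PySem.Set.ofList ["password", "secret", "token", "credential", "private_key"]
def pvDestructive : PySem.Set String := PySem.Set.ofList ["drop", "truncate", "delete", "format", "remove"]
def pvBypass : PySem.Set String := PySem.Set.ofList ["bypass", "override", "inject"]

-- B: single pass OR-ing membership into three booleans, then build the list from the booleans.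
def build_flags_py_alt (triggers : List String) : List String :=
  let acc := triggers.foldl
    (fun (s : Bool × Bool × Bool) kw =>
      (s.1 || PySem.Set.contains pvExfil kw,
       s.2.1 || PySem.Set.contains pvDestructive kw,
       s.2.2 || PySem.Set.contains pvBypass kw))
    (false, false, false)
  let flags : List String := []
  let flags := if acc.1 then flags ++ ["data_exfiltration_risk"] else flags
  let flags := if acc.2.1 then flags ++ ["destructive_action"] else flags
  let flags := if acc.2.2 then flags ++ ["security_bypass"] else flags
  flags

-- ===== PRECONDITION & SPEC =====
def Spec_build_flags_py (triggers : List String) (out : List String) : Prop := out = build_flags_py_alt triggers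
instance (triggers : List String) (out : List String) : Decidable (Spec_build_flags_py triggers out) := by unfold Spec_build_flags_py; infer_instance

-- ===== CLAIM (what is proved, stated in full; the proofs are below) =====
def Claim_equal_build_flags_py : Prop := ∀ (triggers : List String), Dom_build_flags_py triggers → Spec_build_flags_py triggers (build_flags_py triggers)

-- ===== LEMMAS AND PROOFS =====

-- The fold of B computes exactly the three any-scans of A (OR-ed with the initial accumulator).
theorem pvFold_eq_any (triggers : List String) (a b c : Bool) :
    triggers.foldl
      (fun (s : Bool × Bool × Bool) kw =>
        (s.1 || PySem.Set.contains pvExfil kw,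
         s.2.1 || PySem.Set.contains pvDestructive kw,
         s.2.2 || PySem.Set.contains pvBypass kw))
      (a, b, c)
    = (a || triggers.any (fun kw => PySem.Set.contains pvExfil kw),
       b || triggers.any (fun kw => PySem.Set.contains pvDestructive kw),
       c || triggers.any (fun kw => PySem.Set.contains pvBypass kw)) := by
  induction triggers generalizing a b c with
  | nil => simp
  | cons h t ih =>
    simp only [List.foldl_cons, List.any_cons, ih, Bool.or_assoc]

theorem pvContains_exfil (kw : String) :
    PySem.Set.contains pvExfil kw = decide (kw ∈ ["password", "secret", "token", "credential", "private_key"]) := by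
  simp [pvExfil, PySem.Set.contains, PySem.Set.ofList, PySem.Set.add]

theorem pvContains_destructive (kw : String) :
    PySem.Set.contains pvDestructive kw = decide (kw ∈ ["drop", "truncate", "delete", "format", "remove"]) := by
  simp [pvDestructive, PySem.Set.contains, PySem.Set.ofList, PySem.Set.add]

theorem pvContains_bypass (kw : String) :
    PySem.Set.contains pvBypass kw = decide (kw ∈ ["bypass", "override", "inject"]) := by
  simp [pvBypass, PySem.Set.contains, PySem.Set.ofList, PySem.Set.add]

-- ===== VERDICT (by name: the statement is the Claim_ definition above) =====
theorem build_flags_py_spec : Claim_equal_build_flags_py := by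
  intro triggers _
  unfold Spec_build_flags_py build_flags_py build_flags_py_alt
  rw [pvFold_eq_any]
  simp only [Bool.false_or]
  have h1 : (triggers.any (fun kw => PySem.Set.contains pvExfil kw))
      = triggers.any (fun kw => decide (kw ∈ ["password", "secret", "token", "credential", "private_key"])) := by
    simp only [pvContains_exfil]
  have h2 : (triggers.any (fun kw => PySem.Set.contains pvDestructive kw))
      = triggers.any (fun kw => decide (kw ∈ ["drop", "truncate", "delete", "format", "remove"])) := by
    simp only [pvContains_destructive]
  have h3 : (triggers.any (fun kw => PySem.Set.contains pvBypass kw))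
      = triggers.any (fun kw => decide (kw ∈ ["bypass", "override", "inject"])) := by
    simp only [pvContains_bypass]
  simp only [h1, h2, h3]
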